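-- pv_equiv track=rewrite | github.com/StevenXoFk/Tarea-taller-Tkinter | convertidor.py | base7_a_base2
-- ===== SOURCE A (Python) =====
-- def base7_a_base2(numero):
--     decimal = 0
--     exponente = 0
--
--     while numero > 0:
--         digitos = numero % 10
--         decimal += digitos * (7 ** exponente)
--         numero //= 10
--         exponente += 1
--
--     binario = 0
--     valor = 1
--     while decimal > 0:
--         todo = decimal % 2
--         binario += todo * valor
--         decimal //= 2
--         valor *= 10
--
--     return binario
-- ===== SOURCE B (Python) =====
-- def base7_a_base2(numero):
--     def desde7(n):
--         return 0 if n <= 0 else desde7(n // 10) * 7 + n % 10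
--
--     def a2(d):
--         return 0 if d <= 0 else a2(d // 2) * 10 + d % 2
--
--     return a2(desde7(numero))
-- ===== Notes on version B (the rewrite author's own statement) =====
-- stated objective: simpler
-- what changed: Replaces A's two while loops that maintain accumulator plus power counters (7**exponente, valor*=10) with two plain Horner-style recursions over the same divmod structure, carrying no exponent or power state.
import Mathlib
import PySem

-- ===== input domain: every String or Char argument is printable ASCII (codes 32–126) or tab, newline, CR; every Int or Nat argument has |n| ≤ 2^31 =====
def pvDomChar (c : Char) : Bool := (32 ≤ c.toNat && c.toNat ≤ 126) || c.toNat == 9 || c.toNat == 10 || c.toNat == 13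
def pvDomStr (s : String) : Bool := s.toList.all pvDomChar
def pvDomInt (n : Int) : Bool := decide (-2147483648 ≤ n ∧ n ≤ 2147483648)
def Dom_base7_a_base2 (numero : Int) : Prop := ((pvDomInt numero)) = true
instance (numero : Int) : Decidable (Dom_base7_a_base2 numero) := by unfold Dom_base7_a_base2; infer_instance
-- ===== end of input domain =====

-- B replaces A's two accumulator-and-power while loops by two plain Horner-style recursions
-- (no exponent/power-of-ten state); objective: simpler, same cost.

-- ===== PORT A =====
-- first while loop: state (numero, decimal, exponente); exponente starts at 0 and only
-- increments, so 0 ≤ exponente always and `7 ** exponente` is exactly `7 ^ exponente.toNat`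
def base7A_loop1 (numero decimal exponente : Int) : Int :=
  if 0 < numero then
    base7A_loop1 (PySem.Int.floordiv numero 10)
      (decimal + (PySem.Int.mod numero 10) * 7 ^ exponente.toNat) (exponente + 1)
  else decimal
termination_by numero.toNat
decreasing_by simp [PySem.Int.floordiv, Int.fdiv_eq_ediv]; omega

-- second while loop: state (decimal, binario, valor)
def base7A_loop2 (decimal binario valor : Int) : Int :=
  if 0 < decimal then
    base7A_loop2 (PySem.Int.floordiv decimal 2)
      (binario + (PySem.Int.mod decimal 2) * valor) (valor * 10)
  else binario
termination_by decimal.toNat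
decreasing_by simp [PySem.Int.floordiv, Int.fdiv_eq_ediv]; omega

def base7_a_base2 (numero : Int) : Int :=
  base7A_loop2 (base7A_loop1 numero 0 0) 0 1

-- ===== PORT B =====
-- desde7: value of the decimal digits of n read in base 7 (Horner recursion, MSB side)
def base7B_desde7 (n : Int) : Int :=
  if n ≤ 0 then 0
  else base7B_desde7 (PySem.Int.floordiv n 10) * 7 + PySem.Int.mod n 10
termination_by n.toNat
decreasing_by simp [PySem.Int.floordiv, Int.fdiv_eq_ediv]; omega

-- a2: binary digits of d written as a decimal number (Horner recursion, MSB side)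
def base7B_a2 (d : Int) : Int :=
  if d ≤ 0 then 0
  else base7B_a2 (PySem.Int.floordiv d 2) * 10 + PySem.Int.mod d 2
termination_by d.toNat
decreasing_by simp [PySem.Int.floordiv, Int.fdiv_eq_ediv]; omega

def base7_a_base2_alt (numero : Int) : Int :=
  base7B_a2 (base7B_desde7 numero)

-- ===== PRECONDITION & SPEC =====
def Spec_base7_a_base2 (numero : Int) (out : Int) : Prop := out = base7_a_base2_alt numero
instance (numero : Int) (out : Int) : Decidable (Spec_base7_a_base2 numero out) := by unfold Spec_base7_a_base2; infer_instance

-- ===== CLAIM (what is proved, stated in full; the proofs are below) =====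
def Claim_equal_base7_a_base2 : Prop := ∀ (numero : Int), Dom_base7_a_base2 numero → Spec_base7_a_base2 numero (base7_a_base2 numero)

-- ===== LEMMAS AND PROOFS =====

-- A's first loop, with accumulator d and power counter e, computes d + (B's Horner value) * 7^e
theorem loop1_eq (n d e : Int) (he : 0 ≤ e) :
    base7A_loop1 n d e = d + base7B_desde7 n * 7 ^ e.toNat := by
  by_cases h : 0 < n
  · rw [base7A_loop1, if_pos h, base7B_desde7, if_neg (by omega),
      loop1_eq _ _ (e + 1) (by omega)]
    have h1 : (e + 1).toNat = e.toNat + 1 := by omega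
    rw [h1]; ring
  · rw [base7A_loop1, if_neg h, base7B_desde7, if_pos (by omega)]; ring
termination_by n.toNat
decreasing_by simp [PySem.Int.floordiv, Int.fdiv_eq_ediv]; omega

-- A's second loop, with accumulator b and power-of-ten counter v, computes b + (B's Horner value) * v
theorem loop2_eq (d b v : Int) :
    base7A_loop2 d b v = b + base7B_a2 d * v := by
  by_cases h : 0 < d
  · rw [base7A_loop2, if_pos h, base7B_a2, if_neg (by omega), loop2_eq]; ring
  · rw [base7A_loop2, if_neg h, base7B_a2, if_pos (by omega)]; ring
termination_by d.toNat
decreasing_by simp [PySem.Int.floordiv, Int.fdiv_eq_ediv]; omega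

-- ===== VERDICT (by name: the statement is the Claim_ definition above) =====
theorem base7_a_base2_spec : Claim_equal_base7_a_base2 := by
  intro numero _
  unfold Spec_base7_a_base2 base7_a_base2 base7_a_base2_alt
  rw [loop1_eq numero 0 0 le_rfl, loop2_eq]
  simp
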